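/- GENERATED by tools/mkclosed.py from the statements of the program gif (Gif/Spec/Units/*.lean) — do not edit; re-run it when a statement changes.
   THE BOTTOM-UP COMPOSITION: every unit's contract with no hypothesis about a callee left, from the unit theorems, in a
   topological order of the hypotheses (181 units, 39 functions). -/
import Gif.ClosedSpec
import ProgX.Base.Spec.Proved.asan_register_globals_generic
import Gif.Spec.Proved.GifFreeExtensions_COMPOSITION
import Gif.Spec.Proved.GifFreeSavedImages_COMPOSITION
import Gif.Spec.Proved.DGifCloseFile_COMPOSITION
import Gif.Spec.Proved.DGifDecreaseImageCounter_COMPOSITION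
import Gif.Spec.Proved.GifAddExtensionBlock_COMPOSITION
import Gif.Spec.Proved.GifMakeMapObject_COMPOSITION
import Gif.Spec.Proved.digest_extensions_COMPOSITION
import Gif.Spec.Proved.digest_map_COMPOSITION
import Gif.Spec.Proved.DGifBufferedInput_COMPOSITION
import Gif.Spec.Proved.DGifDecompressInput_COMPOSITION
import Gif.Spec.Proved.DGifDecompressLine_COMPOSITION
import Gif.Spec.Proved.DGifGetCodeNext_COMPOSITION
import Gif.Spec.Proved.DGifGetExtensionNext_COMPOSITION
import Gif.Spec.Proved.DGifGetExtension_COMPOSITION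
import Gif.Spec.Proved.DGifGetLine_COMPOSITION
import Gif.Spec.Proved.DGifGetRecordType_COMPOSITION
import Gif.Spec.Proved.DGifGetWord_COMPOSITION
import Gif.Spec.Proved.DGifSetupDecompress_COMPOSITION
import Gif.Spec.Proved.digest_file_COMPOSITION
import Gif.Spec.Proved.DGifGetImageHeader_COMPOSITION
import Gif.Spec.Proved.DGifGetScreenDesc_COMPOSITION
import Gif.Spec.Proved.DGifOpen_COMPOSITION
import Gif.Spec.Proved.DGifGetImageDesc_COMPOSITION
import Gif.Spec.Proved.DGifSlurp_COMPOSITION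
import Gif.Spec.Proved.gif_decode_COMPOSITION
import Gif.Spec.Proved.prog_main_COMPOSITION
namespace Gif.Closed
open X86 X86.User Asan Gif.Spec

/-- **THE COMPOSITION**: one line per unit, callees before callers. -/
theorem closed_of
    (p_DGifBufferedInput_1 : Gif.Spec.DGifBufferedInput_1.Statement)
    (p_DGifBufferedInput_E : Gif.Spec.DGifBufferedInput_E.Statement)
    (p_DGifCloseFile_5 : Gif.Spec.DGifCloseFile_5.Statement)
    (p_DGifDecompressInput_1 : Gif.Spec.DGifDecompressInput_1.Statement)
    (p_DGifDecompressInput_3 : Gif.Spec.DGifDecompressInput_3.Statement)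
    (p_DGifDecompressInput_E : Gif.Spec.DGifDecompressInput_E.Statement)
    (p_DGifDecompressInput_P : Gif.Spec.DGifDecompressInput_P.Statement)
    (p_DGifDecompressLine_1 : Gif.Spec.DGifDecompressLine_1.Statement)
    (p_DGifDecompressLine_10 : Gif.Spec.DGifDecompressLine_10.Statement)
    (p_DGifDecompressLine_11 : Gif.Spec.DGifDecompressLine_11.Statement)
    (p_DGifDecompressLine_12 : Gif.Spec.DGifDecompressLine_12.Statement)
    (p_DGifDecompressLine_13 : Gif.Spec.DGifDecompressLine_13.Statement)
    (p_DGifDecompressLine_2 : Gif.Spec.DGifDecompressLine_2.Statement)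
    (p_DGifDecompressLine_4 : Gif.Spec.DGifDecompressLine_4.Statement)
    (p_DGifDecompressLine_5 : Gif.Spec.DGifDecompressLine_5.Statement)
    (p_DGifDecompressLine_6 : Gif.Spec.DGifDecompressLine_6.Statement)
    (p_DGifDecompressLine_7 : Gif.Spec.DGifDecompressLine_7.Statement)
    (p_DGifDecompressLine_E : Gif.Spec.DGifDecompressLine_E.Statement)
    (p_DGifDecompressLine_P : Gif.Spec.DGifDecompressLine_P.Statement)
    (p_DGifDecreaseImageCounter_1 : Gif.Spec.DGifDecreaseImageCounter_1.Statement)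
    (p_DGifDecreaseImageCounter_E : Gif.Spec.DGifDecreaseImageCounter_E.Statement)
    (p_DGifGetCodeNext_E : Gif.Spec.DGifGetCodeNext_E.Statement)
    (p_DGifGetCodeNext_P : Gif.Spec.DGifGetCodeNext_P.Statement)
    (p_DGifGetExtensionNext_E : Gif.Spec.DGifGetExtensionNext_E.Statement)
    (p_DGifGetExtensionNext_P : Gif.Spec.DGifGetExtensionNext_P.Statement)
    (p_DGifGetExtension_E : Gif.Spec.DGifGetExtension_E.Statement)
    (p_DGifGetExtension_P : Gif.Spec.DGifGetExtension_P.Statement)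
    (p_DGifGetImageDesc_3 : Gif.Spec.DGifGetImageDesc_3.Statement)
    (p_DGifGetImageDesc_4 : Gif.Spec.DGifGetImageDesc_4.Statement)
    (p_DGifGetImageDesc_6 : Gif.Spec.DGifGetImageDesc_6.Statement)
    (p_DGifGetImageDesc_E : Gif.Spec.DGifGetImageDesc_E.Statement)
    (p_DGifGetImageHeader_5 : Gif.Spec.DGifGetImageHeader_5.Statement)
    (p_DGifGetImageHeader_E : Gif.Spec.DGifGetImageHeader_E.Statement)
    (p_DGifGetImageHeader_P : Gif.Spec.DGifGetImageHeader_P.Statement)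
    (p_DGifGetLine_1 : Gif.Spec.DGifGetLine_1.Statement)
    (p_DGifGetLine_E : Gif.Spec.DGifGetLine_E.Statement)
    (p_DGifGetLine_P : Gif.Spec.DGifGetLine_P.Statement)
    (p_DGifGetPrefixChar : Gif.Spec.DGifGetPrefixChar.Statement)
    (p_DGifGetRecordType_2 : Gif.Spec.DGifGetRecordType_2.Statement)
    (p_DGifGetRecordType_E : Gif.Spec.DGifGetRecordType_E.Statement)
    (p_DGifGetRecordType_P : Gif.Spec.DGifGetRecordType_P.Statement)
    (p_DGifGetScreenDesc_3 : Gif.Spec.DGifGetScreenDesc_3.Statement)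
    (p_DGifGetScreenDesc_6 : Gif.Spec.DGifGetScreenDesc_6.Statement)
    (p_DGifGetScreenDesc_E : Gif.Spec.DGifGetScreenDesc_E.Statement)
    (p_DGifGetScreenDesc_P : Gif.Spec.DGifGetScreenDesc_P.Statement)
    (p_DGifGetWord_E : Gif.Spec.DGifGetWord_E.Statement)
    (p_DGifGetWord_P : Gif.Spec.DGifGetWord_P.Statement)
    (p_DGifOpen_1 : Gif.Spec.DGifOpen_1.Statement)
    (p_DGifOpen_2 : Gif.Spec.DGifOpen_2.Statement)
    (p_DGifOpen_E : Gif.Spec.DGifOpen_E.Statement)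
    (p_DGifOpen_P : Gif.Spec.DGifOpen_P.Statement)
    (p_DGifSetupDecompress_2 : Gif.Spec.DGifSetupDecompress_2.Statement)
    (p_DGifSetupDecompress_3 : Gif.Spec.DGifSetupDecompress_3.Statement)
    (p_DGifSetupDecompress_E : Gif.Spec.DGifSetupDecompress_E.Statement)
    (p_DGifSetupDecompress_P : Gif.Spec.DGifSetupDecompress_P.Statement)
    (p_DGifSlurp_1 : Gif.Spec.DGifSlurp_1.Statement)
    (p_DGifSlurp_12 : Gif.Spec.DGifSlurp_12.Statement)
    (p_DGifSlurp_7 : Gif.Spec.DGifSlurp_7.Statement)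
    (p_DGifSlurp_9 : Gif.Spec.DGifSlurp_9.Statement)
    (p_DGifSlurp_E : Gif.Spec.DGifSlurp_E.Statement)
    (p_DGifSlurp_P : Gif.Spec.DGifSlurp_P.Statement)
    (p_GifAddExtensionBlock_2 : Gif.Spec.GifAddExtensionBlock_2.Statement)
    (p_GifAddExtensionBlock_3 : Gif.Spec.GifAddExtensionBlock_3.Statement)
    (p_GifAddExtensionBlock_E : Gif.Spec.GifAddExtensionBlock_E.Statement)
    (p_GifBitSize : Gif.Spec.GifBitSize.Statement)
    (p_GifFreeExtensions_1 : Gif.Spec.GifFreeExtensions_1.Statement)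
    (p_GifFreeExtensions_2 : Gif.Spec.GifFreeExtensions_2.Statement)
    (p_GifFreeMapObject : Gif.Spec.GifFreeMapObject.Statement)
    (p_GifFreeSavedImages_1 : Gif.Spec.GifFreeSavedImages_1.Statement)
    (p_GifFreeSavedImages_2 : Gif.Spec.GifFreeSavedImages_2.Statement)
    (p_GifFreeSavedImages_3 : Gif.Spec.GifFreeSavedImages_3.Statement)
    (p_GifMakeMapObject_1 : Gif.Spec.GifMakeMapObject_1.Statement)
    (p_GifMakeMapObject_2 : Gif.Spec.GifMakeMapObject_2.Statement)
    (p_GifMakeMapObject_E : Gif.Spec.GifMakeMapObject_E.Statement)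
    (p_digest_byte : Gif.Spec.digest_byte.Statement)
    (p_digest_bytes : Gif.Spec.digest_bytes.Statement)
    (p_digest_extensions_E : Gif.Spec.digest_extensions_E.Statement)
    (p_digest_int : Gif.Spec.digest_int.Statement)
    (p_digest_map_1 : Gif.Spec.digest_map_1.Statement)
    (p_digest_map_2 : Gif.Spec.digest_map_2.Statement)
    (p_digest_map_E : Gif.Spec.digest_map_E.Statement)
    (p_gif_decode_1 : Gif.Spec.gif_decode_1.Statement)
    (p_gif_decode_E : Gif.Spec.gif_decode_E.Statement)
    (p_gif_decode_P : Gif.Spec.gif_decode_P.Statement)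
    (p_mem_read : Gif.Spec.mem_read.Statement)
    (p_openbsd_reallocarray : Gif.Spec.openbsd_reallocarray.Statement)
    (p_prog_main_E : Gif.Spec.prog_main_E.Statement)
    (p_prog_main_P : Gif.Spec.prog_main_P.Statement)
    (p_strncmp : Gif.Spec.strncmp.Statement)
    (p_sub_I_65535_1 : Gif.Spec.sub_I_65535_1.Statement)
    (p_DGifCloseFile_1 : Gif.Spec.DGifCloseFile_1.Statement)
    (p_DGifCloseFile_2 : Gif.Spec.DGifCloseFile_2.Statement)
    (p_DGifCloseFile_3 : Gif.Spec.DGifCloseFile_3.Statement)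
    (p_DGifCloseFile_4 : Gif.Spec.DGifCloseFile_4.Statement)
    (p_DGifDecompressLine_14 : Gif.Spec.DGifDecompressLine_14.Statement)
    (p_DGifDecompressLine_15 : Gif.Spec.DGifDecompressLine_15.Statement)
    (p_DGifDecompressLine_8 : Gif.Spec.DGifDecompressLine_8.Statement)
    (p_DGifDecompressLine_9 : Gif.Spec.DGifDecompressLine_9.Statement)
    (p_DGifDecreaseImageCounter_2 : Gif.Spec.DGifDecreaseImageCounter_2.Statement)
    (p_DGifDecreaseImageCounter_3 : Gif.Spec.DGifDecreaseImageCounter_3.Statement)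
    (p_DGifGetImageDesc_2 : Gif.Spec.DGifGetImageDesc_2.Statement)
    (p_DGifOpen_4 : Gif.Spec.DGifOpen_4.Statement)
    (p_DGifSlurp_4 : Gif.Spec.DGifSlurp_4.Statement)
    (p_DGifSlurp_5 : Gif.Spec.DGifSlurp_5.Statement)
    (p_GifAddExtensionBlock_1 : Gif.Spec.GifAddExtensionBlock_1.Statement)
    (p_InternalRead : Gif.Spec.InternalRead.Statement)
    (p_digest_extensions_1 : Gif.Spec.digest_extensions_1.Statement)
    (p_digest_extensions_2 : Gif.Spec.digest_extensions_2.Statement)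
    (p_digest_file_1 : Gif.Spec.digest_file_1.Statement)
    (p_digest_file_2 : Gif.Spec.digest_file_2.Statement)
    (p_digest_file_4 : Gif.Spec.digest_file_4.Statement)
    (p_digest_file_5 : Gif.Spec.digest_file_5.Statement)
    (p_digest_file_7 : Gif.Spec.digest_file_7.Statement)
    (p_gif_decode_5 : Gif.Spec.gif_decode_5.Statement)
    (p_run_ctors : Gif.Spec.run_ctors.Statement)
    (p_DGifBufferedInput_2 : Gif.Spec.DGifBufferedInput_2.Statement)
    (p_DGifBufferedInput_3 : Gif.Spec.DGifBufferedInput_3.Statement)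
    (p_DGifDecompressInput_2 : Gif.Spec.DGifDecompressInput_2.Statement)
    (p_DGifDecompressLine_3 : Gif.Spec.DGifDecompressLine_3.Statement)
    (p_DGifGetCodeNext_1 : Gif.Spec.DGifGetCodeNext_1.Statement)
    (p_DGifGetCodeNext_2 : Gif.Spec.DGifGetCodeNext_2.Statement)
    (p_DGifGetExtensionNext_1 : Gif.Spec.DGifGetExtensionNext_1.Statement)
    (p_DGifGetExtensionNext_2 : Gif.Spec.DGifGetExtensionNext_2.Statement)
    (p_DGifGetExtension_1 : Gif.Spec.DGifGetExtension_1.Statement)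
    (p_DGifGetExtension_2 : Gif.Spec.DGifGetExtension_2.Statement)
    (p_DGifGetImageDesc_5 : Gif.Spec.DGifGetImageDesc_5.Statement)
    (p_DGifGetImageHeader_3 : Gif.Spec.DGifGetImageHeader_3.Statement)
    (p_DGifGetImageHeader_4 : Gif.Spec.DGifGetImageHeader_4.Statement)
    (p_DGifGetLine_2 : Gif.Spec.DGifGetLine_2.Statement)
    (p_DGifGetLine_3 : Gif.Spec.DGifGetLine_3.Statement)
    (p_DGifGetRecordType_1 : Gif.Spec.DGifGetRecordType_1.Statement)
    (p_DGifGetScreenDesc_2 : Gif.Spec.DGifGetScreenDesc_2.Statement)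
    (p_DGifGetScreenDesc_4 : Gif.Spec.DGifGetScreenDesc_4.Statement)
    (p_DGifGetScreenDesc_5 : Gif.Spec.DGifGetScreenDesc_5.Statement)
    (p_DGifGetWord_1 : Gif.Spec.DGifGetWord_1.Statement)
    (p_DGifOpen_3 : Gif.Spec.DGifOpen_3.Statement)
    (p_DGifSetupDecompress_1 : Gif.Spec.DGifSetupDecompress_1.Statement)
    (p_DGifSlurp_10 : Gif.Spec.DGifSlurp_10.Statement)
    (p_DGifSlurp_11 : Gif.Spec.DGifSlurp_11.Statement)
    (p_DGifSlurp_2 : Gif.Spec.DGifSlurp_2.Statement)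
    (p_DGifSlurp_6 : Gif.Spec.DGifSlurp_6.Statement)
    (p_DGifSlurp_8 : Gif.Spec.DGifSlurp_8.Statement)
    (p_digest_file_3 : Gif.Spec.digest_file_3.Statement)
    (p_digest_file_6 : Gif.Spec.digest_file_6.Statement)
    (p_gif_decode_4 : Gif.Spec.gif_decode_4.Statement)
    (p_DGifGetImageHeader_1 : Gif.Spec.DGifGetImageHeader_1.Statement)
    (p_DGifGetImageHeader_2 : Gif.Spec.DGifGetImageHeader_2.Statement)
    (p_DGifGetImageHeader_6 : Gif.Spec.DGifGetImageHeader_6.Statement)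
    (p_DGifGetScreenDesc_1 : Gif.Spec.DGifGetScreenDesc_1.Statement)
    (p_DGifOpen_5 : Gif.Spec.DGifOpen_5.Statement)
    (p_gif_decode_2 : Gif.Spec.gif_decode_2.Statement)
    (p_DGifGetImageDesc_1 : Gif.Spec.DGifGetImageDesc_1.Statement)
    (p_DGifSlurp_3 : Gif.Spec.DGifSlurp_3.Statement)
    (p_gif_decode_3 : Gif.Spec.gif_decode_3.Statement)
    (p_prog_main_1 : Gif.Spec.prog_main_1.Statement)
    (Lay : Layout) (hLay : Lay.hi = 0x1000000) (μ : Microarch) (hμ : UserX.MicroOK μ) (u₀ : State)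
    (hcode : AllCode Lay u₀) (hgiven : ProgX.Base.Closed.Contracts Lay μ u₀) : Contracts Lay μ u₀ := by
  have h_asan_register_globals := ProgX.Base.Spec.Proved.asan_register_globals_generic_ok Lay hLay μ hμ u₀ hcode.asan_register_globals Gif.Spec.rt (by decide) (by decide)
  have h_DGifBufferedInput_1 := p_DGifBufferedInput_1 Lay hLay μ hμ u₀ hcode.DGifBufferedInput hgiven.asan_load1_noabort hgiven.asan_store1_noabort
  have h_DGifBufferedInput_E := p_DGifBufferedInput_E Lay hLay μ hμ u₀ hcode.DGifBufferedInput
  have h_DGifCloseFile_5 := p_DGifCloseFile_5 Lay hLay μ hμ u₀ hcode.DGifCloseFile hgiven.asan_load8_noabort hgiven.asan_load4_noabort hgiven.free hgiven.asan_store4_noabort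
  have h_DGifDecompressInput_1 := p_DGifDecompressInput_1 Lay hLay μ hμ u₀ hcode.DGifDecompressInput hgiven.asan_load8_noabort hgiven.asan_load4_noabort hgiven.asan_store4_noabort
  have h_DGifDecompressInput_3 := p_DGifDecompressInput_3 Lay hLay μ hμ u₀ hcode.DGifDecompressInput hgiven.asan_load8_noabort hgiven.asan_load2_noabort hgiven.asan_store4_noabort hgiven.asan_load4_noabort
  have h_DGifDecompressInput_E := p_DGifDecompressInput_E Lay hLay μ hμ u₀ hcode.DGifDecompressInput
  have h_DGifDecompressInput_P := p_DGifDecompressInput_P Lay hLay μ hμ u₀ hcode.DGifDecompressInput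
  have h_DGifDecompressLine_1 := p_DGifDecompressLine_1 Lay hLay μ hμ u₀ hcode.DGifDecompressLine hgiven.asan_load8_noabort hgiven.asan_load4_noabort
  have h_DGifDecompressLine_10 := p_DGifDecompressLine_10 Lay hLay μ hμ u₀ hcode.DGifDecompressLine hgiven.asan_load1_noabort hgiven.asan_store1_noabort hgiven.asan_load4_noabort
  have h_DGifDecompressLine_11 := p_DGifDecompressLine_11 Lay hLay μ hμ u₀ hcode.DGifDecompressLine hgiven.asan_store1_noabort hgiven.asan_store4_noabort
  have h_DGifDecompressLine_12 := p_DGifDecompressLine_12 Lay hLay μ hμ u₀ hcode.DGifDecompressLine hgiven.asan_load1_noabort hgiven.asan_store1_noabort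
  have h_DGifDecompressLine_13 := p_DGifDecompressLine_13 Lay hLay μ hμ u₀ hcode.DGifDecompressLine hgiven.asan_load4_noabort
  have h_DGifDecompressLine_2 := p_DGifDecompressLine_2 Lay hLay μ hμ u₀ hcode.DGifDecompressLine hgiven.asan_load1_noabort hgiven.asan_store1_noabort
  have h_DGifDecompressLine_4 := p_DGifDecompressLine_4 Lay hLay μ hμ u₀ hcode.DGifDecompressLine hgiven.asan_store4_noabort hgiven.asan_store1_noabort
  have h_DGifDecompressLine_5 := p_DGifDecompressLine_5 Lay hLay μ hμ u₀ hcode.DGifDecompressLine hgiven.asan_store4_noabort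
  have h_DGifDecompressLine_6 := p_DGifDecompressLine_6 Lay hLay μ hμ u₀ hcode.DGifDecompressLine hgiven.asan_load4_noabort hgiven.asan_store4_noabort
  have h_DGifDecompressLine_7 := p_DGifDecompressLine_7 Lay hLay μ hμ u₀ hcode.DGifDecompressLine hgiven.asan_load4_noabort
  have h_DGifDecompressLine_E := p_DGifDecompressLine_E Lay hLay μ hμ u₀ hcode.DGifDecompressLine
  have h_DGifDecompressLine_P := p_DGifDecompressLine_P Lay hLay μ hμ u₀ hcode.DGifDecompressLine
  have h_DGifDecreaseImageCounter_1 := p_DGifDecreaseImageCounter_1 Lay hLay μ hμ u₀ hcode.DGifDecreaseImageCounter hgiven.free hgiven.asan_load4_noabort hgiven.asan_load8_noabort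
  have h_DGifDecreaseImageCounter_E := p_DGifDecreaseImageCounter_E Lay hLay μ hμ u₀ hcode.DGifDecreaseImageCounter
  have h_DGifGetCodeNext_E := p_DGifGetCodeNext_E Lay hLay μ hμ u₀ hcode.DGifGetCodeNext
  have h_DGifGetCodeNext_P := p_DGifGetCodeNext_P Lay hLay μ hμ u₀ hcode.DGifGetCodeNext
  have h_DGifGetExtensionNext_E := p_DGifGetExtensionNext_E Lay hLay μ hμ u₀ hcode.DGifGetExtensionNext
  have h_DGifGetExtensionNext_P := p_DGifGetExtensionNext_P Lay hLay μ hμ u₀ hcode.DGifGetExtensionNext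
  have h_DGifGetExtension_E := p_DGifGetExtension_E Lay hLay μ hμ u₀ hcode.DGifGetExtension
  have h_DGifGetExtension_P := p_DGifGetExtension_P Lay hLay μ hμ u₀ hcode.DGifGetExtension
  have h_DGifGetImageDesc_3 := p_DGifGetImageDesc_3 Lay hLay μ hμ u₀ hcode.DGifGetImageDesc hgiven.malloc hgiven.asan_store8_noabort hgiven.asan_store4_noabort
  have h_DGifGetImageDesc_4 := p_DGifGetImageDesc_4 Lay hLay μ hμ u₀ hcode.DGifGetImageDesc hgiven.memcpy hgiven.asan_load4_noabort
  have h_DGifGetImageDesc_6 := p_DGifGetImageDesc_6 Lay hLay μ hμ u₀ hcode.DGifGetImageDesc hgiven.asan_store8_noabort hgiven.asan_store4_noabort hgiven.asan_load4_noabort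
  have h_DGifGetImageDesc_E := p_DGifGetImageDesc_E Lay hLay μ hμ u₀ hcode.DGifGetImageDesc
  have h_DGifGetImageHeader_5 := p_DGifGetImageHeader_5 Lay hLay μ hμ u₀ hcode.DGifGetImageHeader hgiven.asan_load8_noabort hgiven.asan_store1_noabort
  have h_DGifGetImageHeader_E := p_DGifGetImageHeader_E Lay hLay μ hμ u₀ hcode.DGifGetImageHeader
  have h_DGifGetImageHeader_P := p_DGifGetImageHeader_P Lay hLay μ hμ u₀ hcode.DGifGetImageHeader
  have h_DGifGetLine_1 := p_DGifGetLine_1 Lay hLay μ hμ u₀ hcode.DGifGetLine hgiven.asan_load8_noabort hgiven.asan_load4_noabort hgiven.asan_store4_noabort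
  have h_DGifGetLine_E := p_DGifGetLine_E Lay hLay μ hμ u₀ hcode.DGifGetLine
  have h_DGifGetLine_P := p_DGifGetLine_P Lay hLay μ hμ u₀ hcode.DGifGetLine
  have h_DGifGetPrefixChar := p_DGifGetPrefixChar Lay hLay μ hμ u₀ hcode.DGifGetPrefixChar hgiven.asan_load4_noabort
  have h_DGifGetRecordType_2 := p_DGifGetRecordType_2 Lay hLay μ hμ u₀ hcode.DGifGetRecordType hgiven.asan_store4_noabort
  have h_DGifGetRecordType_E := p_DGifGetRecordType_E Lay hLay μ hμ u₀ hcode.DGifGetRecordType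
  have h_DGifGetRecordType_P := p_DGifGetRecordType_P Lay hLay μ hμ u₀ hcode.DGifGetRecordType
  have h_DGifGetScreenDesc_3 := p_DGifGetScreenDesc_3 Lay hLay μ hμ u₀ hcode.DGifGetScreenDesc hgiven.asan_store4_noabort hgiven.asan_store1_noabort hgiven.asan_store8_noabort
  have h_DGifGetScreenDesc_6 := p_DGifGetScreenDesc_6 Lay hLay μ hμ u₀ hcode.DGifGetScreenDesc hgiven.asan_load8_noabort hgiven.asan_store1_noabort
  have h_DGifGetScreenDesc_E := p_DGifGetScreenDesc_E Lay hLay μ hμ u₀ hcode.DGifGetScreenDesc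
  have h_DGifGetScreenDesc_P := p_DGifGetScreenDesc_P Lay hLay μ hμ u₀ hcode.DGifGetScreenDesc
  have h_DGifGetWord_E := p_DGifGetWord_E Lay hLay μ hμ u₀ hcode.DGifGetWord
  have h_DGifGetWord_P := p_DGifGetWord_P Lay hLay μ hμ u₀ hcode.DGifGetWord
  have h_DGifOpen_1 := p_DGifOpen_1 Lay hLay μ hμ u₀ hcode.DGifOpen hgiven.malloc hgiven.memset hgiven.asan_store8_noabort hgiven.asan_store4_noabort
  have h_DGifOpen_2 := p_DGifOpen_2 Lay hLay μ hμ u₀ hcode.DGifOpen hgiven.calloc hgiven.memset hgiven.free hgiven.asan_store8_noabort hgiven.asan_store4_noabort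
  have h_DGifOpen_E := p_DGifOpen_E Lay hLay μ hμ u₀ hcode.DGifOpen
  have h_DGifOpen_P := p_DGifOpen_P Lay hLay μ hμ u₀ hcode.DGifOpen
  have h_DGifSetupDecompress_2 := p_DGifSetupDecompress_2 Lay hLay μ hμ u₀ hcode.DGifSetupDecompress hgiven.asan_store1_noabort hgiven.asan_store4_noabort hgiven.asan_store8_noabort
  have h_DGifSetupDecompress_3 := p_DGifSetupDecompress_3 Lay hLay μ hμ u₀ hcode.DGifSetupDecompress hgiven.asan_store4_noabort
  have h_DGifSetupDecompress_E := p_DGifSetupDecompress_E Lay hLay μ hμ u₀ hcode.DGifSetupDecompress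
  have h_DGifSetupDecompress_P := p_DGifSetupDecompress_P Lay hLay μ hμ u₀ hcode.DGifSetupDecompress
  have h_DGifSlurp_1 := p_DGifSlurp_1 Lay hLay μ hμ u₀ hcode.DGifSlurp hgiven.asan_store8_noabort hgiven.asan_store4_noabort
  have h_DGifSlurp_12 := p_DGifSlurp_12 Lay hLay μ hμ u₀ hcode.DGifSlurp hgiven.asan_load4_noabort hgiven.asan_store4_noabort
  have h_DGifSlurp_7 := p_DGifSlurp_7 Lay hLay μ hμ u₀ hcode.DGifSlurp hgiven.asan_load4_noabort
  have h_DGifSlurp_9 := p_DGifSlurp_9 Lay hLay μ hμ u₀ hcode.DGifSlurp hgiven.asan_load8_noabort hgiven.asan_store8_noabort hgiven.asan_load4_noabort hgiven.asan_store4_noabort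
  have h_DGifSlurp_E := p_DGifSlurp_E Lay hLay μ hμ u₀ hcode.DGifSlurp
  have h_DGifSlurp_P := p_DGifSlurp_P Lay hLay μ hμ u₀ hcode.DGifSlurp
  have h_GifAddExtensionBlock_2 := p_GifAddExtensionBlock_2 Lay hLay μ hμ u₀ hcode.GifAddExtensionBlock hgiven.malloc hgiven.asan_load8_noabort hgiven.asan_load4_noabort hgiven.asan_store4_noabort hgiven.asan_store8_noabort
  have h_GifAddExtensionBlock_3 := p_GifAddExtensionBlock_3 Lay hLay μ hμ u₀ hcode.GifAddExtensionBlock hgiven.memcpy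
  have h_GifAddExtensionBlock_E := p_GifAddExtensionBlock_E Lay hLay μ hμ u₀ hcode.GifAddExtensionBlock
  have h_GifBitSize := p_GifBitSize Lay hLay μ hμ u₀ hcode.GifBitSize
  have h_GifFreeExtensions_1 := p_GifFreeExtensions_1 Lay hLay μ hμ u₀ hcode.GifFreeExtensions hgiven.asan_load8_noabort
  have h_GifFreeExtensions_2 := p_GifFreeExtensions_2 Lay hLay μ hμ u₀ hcode.GifFreeExtensions hgiven.free hgiven.asan_load8_noabort hgiven.asan_load4_noabort hgiven.asan_store8_noabort hgiven.asan_store4_noabort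
  have h_GifFreeExtensions_COMPOSITION := Gif.Spec.Proved.GifFreeExtensions_COMPOSITION_ok Lay hLay μ hμ u₀ h_GifFreeExtensions_1 h_GifFreeExtensions_2
  have h_GifFreeMapObject := p_GifFreeMapObject Lay hLay μ hμ u₀ hcode.GifFreeMapObject hgiven.free hgiven.asan_load8_noabort
  have h_GifFreeSavedImages_1 := p_GifFreeSavedImages_1 Lay hLay μ hμ u₀ hcode.GifFreeSavedImages hgiven.asan_load8_noabort
  have h_GifFreeSavedImages_2 := p_GifFreeSavedImages_2 Lay hLay μ hμ u₀ hcode.GifFreeSavedImages h_GifFreeMapObject hgiven.free h_GifFreeExtensions_COMPOSITION hgiven.asan_load8_noabort hgiven.asan_load4_noabort hgiven.asan_store8_noabort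
  have h_GifFreeSavedImages_3 := p_GifFreeSavedImages_3 Lay hLay μ hμ u₀ hcode.GifFreeSavedImages hgiven.free hgiven.asan_store8_noabort
  have h_GifFreeSavedImages_COMPOSITION := Gif.Spec.Proved.GifFreeSavedImages_COMPOSITION_ok Lay hLay μ hμ u₀ h_GifFreeSavedImages_1 h_GifFreeSavedImages_2 h_GifFreeSavedImages_3
  have h_GifMakeMapObject_1 := p_GifMakeMapObject_1 Lay hLay μ hμ u₀ hcode.GifMakeMapObject h_GifBitSize hgiven.malloc
  have h_GifMakeMapObject_2 := p_GifMakeMapObject_2 Lay hLay μ hμ u₀ hcode.GifMakeMapObject hgiven.calloc hgiven.memcpy hgiven.free hgiven.asan_store8_noabort hgiven.asan_store4_noabort hgiven.asan_store1_noabort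
  have h_GifMakeMapObject_E := p_GifMakeMapObject_E Lay hLay μ hμ u₀ hcode.GifMakeMapObject
  have h_digest_byte := p_digest_byte Lay hLay μ hμ u₀ hcode.digest_byte
  have h_digest_bytes := p_digest_bytes Lay hLay μ hμ u₀ hcode.digest_bytes h_digest_byte hgiven.asan_load1_noabort
  have h_digest_extensions_E := p_digest_extensions_E Lay hLay μ hμ u₀ hcode.digest_extensions
  have h_digest_int := p_digest_int Lay hLay μ hμ u₀ hcode.digest_int h_digest_byte
  have h_digest_map_1 := p_digest_map_1 Lay hLay μ hμ u₀ hcode.digest_map h_digest_int hgiven.asan_load4_noabort hgiven.asan_load1_noabort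
  have h_digest_map_2 := p_digest_map_2 Lay hLay μ hμ u₀ hcode.digest_map h_digest_byte hgiven.asan_load8_noabort hgiven.asan_load1_noabort
  have h_digest_map_E := p_digest_map_E Lay hLay μ hμ u₀ hcode.digest_map
  have h_gif_decode_1 := p_gif_decode_1 Lay hLay μ hμ u₀ hcode.gif_decode hgiven.asan_store4_noabort hgiven.asan_store8_noabort
  have h_gif_decode_E := p_gif_decode_E Lay hLay μ hμ u₀ hcode.gif_decode
  have h_gif_decode_P := p_gif_decode_P Lay hLay μ hμ u₀ hcode.gif_decode
  have h_mem_read := p_mem_read Lay hLay μ hμ u₀ hcode.mem_read hgiven.memcpy hgiven.asan_load8_noabort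
  have h_openbsd_reallocarray := p_openbsd_reallocarray Lay hLay μ hμ u₀ hcode.openbsd_reallocarray hgiven.realloc
  have h_prog_main_E := p_prog_main_E Lay hLay μ hμ u₀ hcode.prog_main
  have h_prog_main_P := p_prog_main_P Lay hLay μ hμ u₀ hcode.prog_main
  have h_strncmp := p_strncmp Lay hLay μ hμ u₀ hcode.strncmp hgiven.asan_load1_noabort
  have h_sub_I_65535_1 := p_sub_I_65535_1 Lay hLay μ hμ u₀ hcode.sub_I_65535_1 h_asan_register_globals
  have h_DGifCloseFile_1 := p_DGifCloseFile_1 Lay hLay μ hμ u₀ hcode.DGifCloseFile hgiven.asan_load8_noabort h_GifFreeMapObject hgiven.asan_store8_noabort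
  have h_DGifCloseFile_2 := p_DGifCloseFile_2 Lay hLay μ hμ u₀ hcode.DGifCloseFile hgiven.asan_load8_noabort h_GifFreeMapObject hgiven.asan_store8_noabort
  have h_DGifCloseFile_3 := p_DGifCloseFile_3 Lay hLay μ hμ u₀ hcode.DGifCloseFile hgiven.asan_load8_noabort h_GifFreeSavedImages_COMPOSITION hgiven.asan_store8_noabort
  have h_DGifCloseFile_4 := p_DGifCloseFile_4 Lay hLay μ hμ u₀ hcode.DGifCloseFile h_GifFreeExtensions_COMPOSITION
  have h_DGifCloseFile_COMPOSITION := Gif.Spec.Proved.DGifCloseFile_COMPOSITION_ok Lay hLay μ hμ u₀ h_DGifCloseFile_1 h_DGifCloseFile_2 h_DGifCloseFile_3 h_DGifCloseFile_4 h_DGifCloseFile_5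
  have h_DGifDecompressLine_14 := p_DGifDecompressLine_14 Lay hLay μ hμ u₀ hcode.DGifDecompressLine h_DGifGetPrefixChar hgiven.asan_store1_noabort
  have h_DGifDecompressLine_15 := p_DGifDecompressLine_15 Lay hLay μ hμ u₀ hcode.DGifDecompressLine h_DGifGetPrefixChar hgiven.asan_store1_noabort
  have h_DGifDecompressLine_8 := p_DGifDecompressLine_8 Lay hLay μ hμ u₀ hcode.DGifDecompressLine h_DGifGetPrefixChar hgiven.asan_store1_noabort
  have h_DGifDecompressLine_9 := p_DGifDecompressLine_9 Lay hLay μ hμ u₀ hcode.DGifDecompressLine h_DGifGetPrefixChar hgiven.asan_store1_noabort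
  have h_DGifDecreaseImageCounter_2 := p_DGifDecreaseImageCounter_2 Lay hLay μ hμ u₀ hcode.DGifDecreaseImageCounter h_GifFreeMapObject hgiven.asan_load8_noabort hgiven.asan_load4_noabort
  have h_DGifDecreaseImageCounter_3 := p_DGifDecreaseImageCounter_3 Lay hLay μ hμ u₀ hcode.DGifDecreaseImageCounter h_openbsd_reallocarray hgiven.free hgiven.asan_load4_noabort hgiven.asan_load8_noabort hgiven.asan_store8_noabort hgiven.asan_store4_noabort
  have h_DGifDecreaseImageCounter_COMPOSITION := Gif.Spec.Proved.DGifDecreaseImageCounter_COMPOSITION_ok Lay hLay μ hμ u₀ h_DGifDecreaseImageCounter_1 h_DGifDecreaseImageCounter_2 h_DGifDecreaseImageCounter_3 h_DGifDecreaseImageCounter_E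
  have h_DGifGetImageDesc_2 := p_DGifGetImageDesc_2 Lay hLay μ hμ u₀ hcode.DGifGetImageDesc h_openbsd_reallocarray hgiven.asan_load8_noabort hgiven.asan_load4_noabort hgiven.asan_store8_noabort hgiven.asan_store4_noabort
  have h_DGifOpen_4 := p_DGifOpen_4 Lay hLay μ hμ u₀ hcode.DGifOpen h_strncmp hgiven.free hgiven.asan_store4_noabort
  have h_DGifSlurp_4 := p_DGifSlurp_4 Lay hLay μ hμ u₀ hcode.DGifSlurp hgiven.asan_load8_noabort hgiven.asan_load4_noabort h_DGifDecreaseImageCounter_COMPOSITION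
  have h_DGifSlurp_5 := p_DGifSlurp_5 Lay hLay μ hμ u₀ hcode.DGifSlurp h_openbsd_reallocarray hgiven.asan_store8_noabort hgiven.asan_load1_noabort h_DGifDecreaseImageCounter_COMPOSITION
  have h_GifAddExtensionBlock_1 := p_GifAddExtensionBlock_1 Lay hLay μ hμ u₀ hcode.GifAddExtensionBlock h_openbsd_reallocarray hgiven.malloc hgiven.asan_load8_noabort hgiven.asan_load4_noabort hgiven.asan_store8_noabort
  have h_GifAddExtensionBlock_COMPOSITION := Gif.Spec.Proved.GifAddExtensionBlock_COMPOSITION_ok Lay hLay μ hμ u₀ h_GifAddExtensionBlock_1 h_GifAddExtensionBlock_2 h_GifAddExtensionBlock_3 h_GifAddExtensionBlock_E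
  have h_GifMakeMapObject_COMPOSITION := Gif.Spec.Proved.GifMakeMapObject_COMPOSITION_ok Lay hLay μ hμ u₀ h_GifMakeMapObject_1 h_GifMakeMapObject_2 h_GifMakeMapObject_E
  have h_InternalRead := p_InternalRead Lay hLay μ hμ u₀ hcode.InternalRead hgiven.asan_load8_noabort h_mem_read
  have h_digest_extensions_1 := p_digest_extensions_1 Lay hLay μ hμ u₀ hcode.digest_extensions h_digest_int
  have h_digest_extensions_2 := p_digest_extensions_2 Lay hLay μ hμ u₀ hcode.digest_extensions h_digest_int h_digest_bytes hgiven.asan_load4_noabort hgiven.asan_load8_noabort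
  have h_digest_extensions_COMPOSITION := Gif.Spec.Proved.digest_extensions_COMPOSITION_ok Lay hLay μ hμ u₀ h_digest_extensions_1 h_digest_extensions_2 h_digest_extensions_E
  have h_digest_file_1 := p_digest_file_1 Lay hLay μ hμ u₀ hcode.digest_file h_digest_int hgiven.asan_load4_noabort
  have h_digest_file_2 := p_digest_file_2 Lay hLay μ hμ u₀ hcode.digest_file h_digest_int hgiven.asan_load4_noabort hgiven.asan_load1_noabort
  have h_digest_file_4 := p_digest_file_4 Lay hLay μ hμ u₀ hcode.digest_file h_digest_int hgiven.asan_load8_noabort hgiven.asan_load4_noabort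
  have h_digest_file_5 := p_digest_file_5 Lay hLay μ hμ u₀ hcode.digest_file h_digest_int hgiven.asan_load1_noabort
  have h_digest_file_7 := p_digest_file_7 Lay hLay μ hμ u₀ hcode.digest_file h_digest_extensions_COMPOSITION hgiven.asan_load8_noabort hgiven.asan_load4_noabort hgiven.asan_store8_noabort
  have h_digest_map_COMPOSITION := Gif.Spec.Proved.digest_map_COMPOSITION_ok Lay hLay μ hμ u₀ h_digest_map_1 h_digest_map_2 h_digest_map_E
  have h_gif_decode_5 := p_gif_decode_5 Lay hLay μ hμ u₀ hcode.gif_decode h_DGifCloseFile_COMPOSITION hgiven.asan_store4_noabort hgiven.asan_store8_noabort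
  have h_run_ctors := p_run_ctors Lay hLay μ hμ u₀ hcode.run_ctors h_sub_I_65535_1
  have h_DGifBufferedInput_2 := p_DGifBufferedInput_2 Lay hLay μ hμ u₀ hcode.DGifBufferedInput h_InternalRead hgiven.asan_load1_noabort hgiven.asan_store4_noabort
  have h_DGifBufferedInput_3 := p_DGifBufferedInput_3 Lay hLay μ hμ u₀ hcode.DGifBufferedInput h_InternalRead hgiven.asan_load1_noabort hgiven.asan_store1_noabort hgiven.asan_store4_noabort
  have h_DGifBufferedInput_COMPOSITION := Gif.Spec.Proved.DGifBufferedInput_COMPOSITION_ok Lay hLay μ hμ u₀ h_DGifBufferedInput_1 h_DGifBufferedInput_2 h_DGifBufferedInput_3 h_DGifBufferedInput_E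
  have h_DGifDecompressInput_2 := p_DGifDecompressInput_2 Lay hLay μ hμ u₀ hcode.DGifDecompressInput h_DGifBufferedInput_COMPOSITION hgiven.asan_load4_noabort hgiven.asan_load8_noabort
  have h_DGifDecompressInput_COMPOSITION := Gif.Spec.Proved.DGifDecompressInput_COMPOSITION_ok Lay hLay μ hμ u₀ h_DGifDecompressInput_P h_DGifDecompressInput_1 h_DGifDecompressInput_2 h_DGifDecompressInput_3 h_DGifDecompressInput_E
  have h_DGifDecompressLine_3 := p_DGifDecompressLine_3 Lay hLay μ hμ u₀ hcode.DGifDecompressLine h_DGifDecompressInput_COMPOSITION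
  have h_DGifDecompressLine_COMPOSITION := Gif.Spec.Proved.DGifDecompressLine_COMPOSITION_ok Lay hLay μ hμ u₀ h_DGifDecompressLine_P h_DGifDecompressLine_1 h_DGifDecompressLine_2 h_DGifDecompressLine_3 h_DGifDecompressLine_4 h_DGifDecompressLine_5 h_DGifDecompressLine_6 h_DGifDecompressLine_7 h_DGifDecompressLine_8 h_DGifDecompressLine_9 h_DGifDecompressLine_10 h_DGifDecompressLine_11 h_DGifDecompressLine_12 h_DGifDecompressLine_13 h_DGifDecompressLine_14 h_DGifDecompressLine_15 h_DGifDecompressLine_E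
  have h_DGifGetCodeNext_1 := p_DGifGetCodeNext_1 Lay hLay μ hμ u₀ hcode.DGifGetCodeNext h_InternalRead hgiven.asan_load8_noabort hgiven.asan_store4_noabort
  have h_DGifGetCodeNext_2 := p_DGifGetCodeNext_2 Lay hLay μ hμ u₀ hcode.DGifGetCodeNext h_InternalRead hgiven.asan_store8_noabort hgiven.asan_store1_noabort hgiven.asan_store4_noabort
  have h_DGifGetCodeNext_COMPOSITION := Gif.Spec.Proved.DGifGetCodeNext_COMPOSITION_ok Lay hLay μ hμ u₀ h_DGifGetCodeNext_P h_DGifGetCodeNext_1 h_DGifGetCodeNext_2 h_DGifGetCodeNext_E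
  have h_DGifGetExtensionNext_1 := p_DGifGetExtensionNext_1 Lay hLay μ hμ u₀ hcode.DGifGetExtensionNext h_InternalRead hgiven.asan_load8_noabort hgiven.asan_store4_noabort
  have h_DGifGetExtensionNext_2 := p_DGifGetExtensionNext_2 Lay hLay μ hμ u₀ hcode.DGifGetExtensionNext h_InternalRead hgiven.asan_store8_noabort hgiven.asan_store1_noabort hgiven.asan_store4_noabort
  have h_DGifGetExtensionNext_COMPOSITION := Gif.Spec.Proved.DGifGetExtensionNext_COMPOSITION_ok Lay hLay μ hμ u₀ h_DGifGetExtensionNext_P h_DGifGetExtensionNext_1 h_DGifGetExtensionNext_2 h_DGifGetExtensionNext_E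
  have h_DGifGetExtension_1 := p_DGifGetExtension_1 Lay hLay μ hμ u₀ hcode.DGifGetExtension h_InternalRead hgiven.asan_load8_noabort hgiven.asan_load4_noabort hgiven.asan_store4_noabort
  have h_DGifGetExtension_2 := p_DGifGetExtension_2 Lay hLay μ hμ u₀ hcode.DGifGetExtension h_DGifGetExtensionNext_COMPOSITION hgiven.asan_store4_noabort
  have h_DGifGetExtension_COMPOSITION := Gif.Spec.Proved.DGifGetExtension_COMPOSITION_ok Lay hLay μ hμ u₀ h_DGifGetExtension_P h_DGifGetExtension_1 h_DGifGetExtension_2 h_DGifGetExtension_E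
  have h_DGifGetImageDesc_5 := p_DGifGetImageDesc_5 Lay hLay μ hμ u₀ hcode.DGifGetImageDesc h_GifMakeMapObject_COMPOSITION hgiven.asan_load8_noabort hgiven.asan_load4_noabort hgiven.asan_store8_noabort hgiven.asan_store4_noabort
  have h_DGifGetImageHeader_3 := p_DGifGetImageHeader_3 Lay hLay μ hμ u₀ hcode.DGifGetImageHeader h_GifFreeMapObject h_GifMakeMapObject_COMPOSITION hgiven.asan_store1_noabort hgiven.asan_load8_noabort hgiven.asan_store8_noabort hgiven.asan_store4_noabort
  have h_DGifGetImageHeader_4 := p_DGifGetImageHeader_4 Lay hLay μ hμ u₀ hcode.DGifGetImageHeader h_InternalRead h_GifFreeMapObject hgiven.asan_load4_noabort hgiven.asan_load8_noabort hgiven.asan_store4_noabort hgiven.asan_store8_noabort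
  have h_DGifGetLine_2 := p_DGifGetLine_2 Lay hLay μ hμ u₀ hcode.DGifGetLine h_DGifDecompressLine_COMPOSITION hgiven.asan_load8_noabort
  have h_DGifGetLine_3 := p_DGifGetLine_3 Lay hLay μ hμ u₀ hcode.DGifGetLine h_DGifGetCodeNext_COMPOSITION
  have h_DGifGetLine_COMPOSITION := Gif.Spec.Proved.DGifGetLine_COMPOSITION_ok Lay hLay μ hμ u₀ h_DGifGetLine_P h_DGifGetLine_1 h_DGifGetLine_2 h_DGifGetLine_3 h_DGifGetLine_E
  have h_DGifGetRecordType_1 := p_DGifGetRecordType_1 Lay hLay μ hμ u₀ hcode.DGifGetRecordType h_InternalRead hgiven.asan_load8_noabort hgiven.asan_load4_noabort hgiven.asan_store4_noabort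
  have h_DGifGetRecordType_COMPOSITION := Gif.Spec.Proved.DGifGetRecordType_COMPOSITION_ok Lay hLay μ hμ u₀ h_DGifGetRecordType_P h_DGifGetRecordType_1 h_DGifGetRecordType_2 h_DGifGetRecordType_E
  have h_DGifGetScreenDesc_2 := p_DGifGetScreenDesc_2 Lay hLay μ hμ u₀ hcode.DGifGetScreenDesc h_InternalRead h_GifFreeMapObject hgiven.asan_store4_noabort hgiven.asan_load8_noabort hgiven.asan_store8_noabort
  have h_DGifGetScreenDesc_4 := p_DGifGetScreenDesc_4 Lay hLay μ hμ u₀ hcode.DGifGetScreenDesc h_GifMakeMapObject_COMPOSITION hgiven.asan_store8_noabort hgiven.asan_store1_noabort hgiven.asan_store4_noabort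
  have h_DGifGetScreenDesc_5 := p_DGifGetScreenDesc_5 Lay hLay μ hμ u₀ hcode.DGifGetScreenDesc h_InternalRead h_GifFreeMapObject hgiven.asan_load4_noabort hgiven.asan_load8_noabort hgiven.asan_store8_noabort hgiven.asan_store4_noabort
  have h_DGifGetWord_1 := p_DGifGetWord_1 Lay hLay μ hμ u₀ hcode.DGifGetWord h_InternalRead hgiven.asan_store4_noabort
  have h_DGifGetWord_COMPOSITION := Gif.Spec.Proved.DGifGetWord_COMPOSITION_ok Lay hLay μ hμ u₀ h_DGifGetWord_P h_DGifGetWord_1 h_DGifGetWord_E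
  have h_DGifOpen_3 := p_DGifOpen_3 Lay hLay μ hμ u₀ hcode.DGifOpen h_InternalRead hgiven.free hgiven.asan_store4_noabort
  have h_DGifSetupDecompress_1 := p_DGifSetupDecompress_1 Lay hLay μ hμ u₀ hcode.DGifSetupDecompress h_InternalRead hgiven.asan_load8_noabort hgiven.asan_store4_noabort
  have h_DGifSetupDecompress_COMPOSITION := Gif.Spec.Proved.DGifSetupDecompress_COMPOSITION_ok Lay hLay μ hμ u₀ h_DGifSetupDecompress_P h_DGifSetupDecompress_1 h_DGifSetupDecompress_2 h_DGifSetupDecompress_3 h_DGifSetupDecompress_E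
  have h_DGifSlurp_10 := p_DGifSlurp_10 Lay hLay μ hμ u₀ hcode.DGifSlurp h_DGifGetExtension_COMPOSITION hgiven.asan_load1_noabort h_GifAddExtensionBlock_COMPOSITION
  have h_DGifSlurp_11 := p_DGifSlurp_11 Lay hLay μ hμ u₀ hcode.DGifSlurp h_DGifGetExtensionNext_COMPOSITION hgiven.asan_load1_noabort h_GifAddExtensionBlock_COMPOSITION
  have h_DGifSlurp_2 := p_DGifSlurp_2 Lay hLay μ hμ u₀ hcode.DGifSlurp h_DGifGetRecordType_COMPOSITION
  have h_DGifSlurp_6 := p_DGifSlurp_6 Lay hLay μ hμ u₀ hcode.DGifSlurp h_DGifGetLine_COMPOSITION h_DGifDecreaseImageCounter_COMPOSITION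
  have h_DGifSlurp_8 := p_DGifSlurp_8 Lay hLay μ hμ u₀ hcode.DGifSlurp hgiven.asan_load4_noabort h_DGifGetLine_COMPOSITION h_DGifDecreaseImageCounter_COMPOSITION
  have h_digest_file_3 := p_digest_file_3 Lay hLay μ hμ u₀ hcode.digest_file h_digest_map_COMPOSITION h_digest_int hgiven.asan_load8_noabort hgiven.asan_load4_noabort
  have h_digest_file_6 := p_digest_file_6 Lay hLay μ hμ u₀ hcode.digest_file h_digest_map_COMPOSITION h_digest_bytes h_digest_extensions_COMPOSITION hgiven.asan_load8_noabort hgiven.asan_load4_noabort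
  have h_digest_file_COMPOSITION := Gif.Spec.Proved.digest_file_COMPOSITION_ok Lay hLay μ hμ u₀ h_digest_file_1 h_digest_file_2 h_digest_file_3 h_digest_file_4 h_digest_file_5 h_digest_file_6 h_digest_file_7
  have h_gif_decode_4 := p_gif_decode_4 Lay hLay μ hμ u₀ hcode.gif_decode h_digest_file_COMPOSITION hgiven.asan_store8_noabort
  have h_DGifGetImageHeader_1 := p_DGifGetImageHeader_1 Lay hLay μ hμ u₀ hcode.DGifGetImageHeader h_DGifGetWord_COMPOSITION hgiven.asan_load8_noabort hgiven.asan_load4_noabort hgiven.asan_store4_noabort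
  have h_DGifGetImageHeader_2 := p_DGifGetImageHeader_2 Lay hLay μ hμ u₀ hcode.DGifGetImageHeader h_DGifGetWord_COMPOSITION h_InternalRead h_GifFreeMapObject hgiven.asan_store4_noabort hgiven.asan_load8_noabort hgiven.asan_store8_noabort
  have h_DGifGetImageHeader_6 := p_DGifGetImageHeader_6 Lay hLay μ hμ u₀ hcode.DGifGetImageHeader h_DGifSetupDecompress_COMPOSITION hgiven.asan_load4_noabort hgiven.asan_store8_noabort
  have h_DGifGetImageHeader_COMPOSITION := Gif.Spec.Proved.DGifGetImageHeader_COMPOSITION_ok Lay hLay μ hμ u₀ h_DGifGetImageHeader_P h_DGifGetImageHeader_1 h_DGifGetImageHeader_2 h_DGifGetImageHeader_3 h_DGifGetImageHeader_4 h_DGifGetImageHeader_5 h_DGifGetImageHeader_6 h_DGifGetImageHeader_E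
  have h_DGifGetScreenDesc_1 := p_DGifGetScreenDesc_1 Lay hLay μ hμ u₀ hcode.DGifGetScreenDesc h_DGifGetWord_COMPOSITION hgiven.asan_load8_noabort hgiven.asan_load4_noabort
  have h_DGifGetScreenDesc_COMPOSITION := Gif.Spec.Proved.DGifGetScreenDesc_COMPOSITION_ok Lay hLay μ hμ u₀ h_DGifGetScreenDesc_P h_DGifGetScreenDesc_1 h_DGifGetScreenDesc_2 h_DGifGetScreenDesc_3 h_DGifGetScreenDesc_4 h_DGifGetScreenDesc_5 h_DGifGetScreenDesc_6 h_DGifGetScreenDesc_E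
  have h_DGifOpen_5 := p_DGifOpen_5 Lay hLay μ hμ u₀ hcode.DGifOpen h_DGifGetScreenDesc_COMPOSITION hgiven.free hgiven.asan_store4_noabort hgiven.asan_store1_noabort
  have h_DGifOpen_COMPOSITION := Gif.Spec.Proved.DGifOpen_COMPOSITION_ok Lay hLay μ hμ u₀ h_DGifOpen_P h_DGifOpen_1 h_DGifOpen_2 h_DGifOpen_3 h_DGifOpen_4 h_DGifOpen_5 h_DGifOpen_E
  have h_gif_decode_2 := p_gif_decode_2 Lay hLay μ hμ u₀ hcode.gif_decode h_DGifOpen_COMPOSITION hgiven.asan_store4_noabort hgiven.asan_store8_noabort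
  have h_DGifGetImageDesc_1 := p_DGifGetImageDesc_1 Lay hLay μ hμ u₀ hcode.DGifGetImageDesc h_DGifGetImageHeader_COMPOSITION hgiven.asan_load8_noabort hgiven.asan_load4_noabort hgiven.asan_store4_noabort
  have h_DGifGetImageDesc_COMPOSITION := Gif.Spec.Proved.DGifGetImageDesc_COMPOSITION_ok Lay hLay μ hμ u₀ h_DGifGetImageDesc_1 h_DGifGetImageDesc_2 h_DGifGetImageDesc_3 h_DGifGetImageDesc_4 h_DGifGetImageDesc_5 h_DGifGetImageDesc_6 h_DGifGetImageDesc_E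
  have h_DGifSlurp_3 := p_DGifSlurp_3 Lay hLay μ hμ u₀ hcode.DGifSlurp h_DGifGetImageDesc_COMPOSITION
  have h_DGifSlurp_COMPOSITION := Gif.Spec.Proved.DGifSlurp_COMPOSITION_ok Lay hLay μ hμ u₀ h_DGifSlurp_P h_DGifSlurp_1 h_DGifSlurp_2 h_DGifSlurp_3 h_DGifSlurp_4 h_DGifSlurp_5 h_DGifSlurp_6 h_DGifSlurp_7 h_DGifSlurp_8 h_DGifSlurp_9 h_DGifSlurp_10 h_DGifSlurp_11 h_DGifSlurp_12 h_DGifSlurp_E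
  have h_gif_decode_3 := p_gif_decode_3 Lay hLay μ hμ u₀ hcode.gif_decode h_DGifSlurp_COMPOSITION hgiven.asan_store4_noabort hgiven.asan_load4_noabort
  have h_gif_decode_COMPOSITION := Gif.Spec.Proved.gif_decode_COMPOSITION_ok Lay hLay μ hμ u₀ h_gif_decode_P h_gif_decode_1 h_gif_decode_2 h_gif_decode_3 h_gif_decode_4 h_gif_decode_5 h_gif_decode_E
  have h_prog_main_1 := p_prog_main_1 Lay hLay μ hμ u₀ hcode.prog_main h_gif_decode_COMPOSITION hgiven.memcpy
  have h_prog_main_COMPOSITION := Gif.Spec.Proved.prog_main_COMPOSITION_ok Lay hLay μ hμ u₀ h_prog_main_P h_prog_main_1 h_prog_main_E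
  exact {
    DGifBufferedInput_1 := h_DGifBufferedInput_1,
    DGifBufferedInput_E := h_DGifBufferedInput_E,
    DGifCloseFile_5 := h_DGifCloseFile_5,
    DGifDecompressInput_1 := h_DGifDecompressInput_1,
    DGifDecompressInput_3 := h_DGifDecompressInput_3,
    DGifDecompressInput_E := h_DGifDecompressInput_E,
    DGifDecompressInput_P := h_DGifDecompressInput_P,
    DGifDecompressLine_1 := h_DGifDecompressLine_1,
    DGifDecompressLine_10 := h_DGifDecompressLine_10,
    DGifDecompressLine_11 := h_DGifDecompressLine_11,
    DGifDecompressLine_12 := h_DGifDecompressLine_12,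
    DGifDecompressLine_13 := h_DGifDecompressLine_13,
    DGifDecompressLine_2 := h_DGifDecompressLine_2,
    DGifDecompressLine_4 := h_DGifDecompressLine_4,
    DGifDecompressLine_5 := h_DGifDecompressLine_5,
    DGifDecompressLine_6 := h_DGifDecompressLine_6,
    DGifDecompressLine_7 := h_DGifDecompressLine_7,
    DGifDecompressLine_E := h_DGifDecompressLine_E,
    DGifDecompressLine_P := h_DGifDecompressLine_P,
    DGifDecreaseImageCounter_1 := h_DGifDecreaseImageCounter_1,
    DGifDecreaseImageCounter_E := h_DGifDecreaseImageCounter_E,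
    DGifGetCodeNext_E := h_DGifGetCodeNext_E,
    DGifGetCodeNext_P := h_DGifGetCodeNext_P,
    DGifGetExtensionNext_E := h_DGifGetExtensionNext_E,
    DGifGetExtensionNext_P := h_DGifGetExtensionNext_P,
    DGifGetExtension_E := h_DGifGetExtension_E,
    DGifGetExtension_P := h_DGifGetExtension_P,
    DGifGetImageDesc_3 := h_DGifGetImageDesc_3,
    DGifGetImageDesc_4 := h_DGifGetImageDesc_4,
    DGifGetImageDesc_6 := h_DGifGetImageDesc_6,
    DGifGetImageDesc_E := h_DGifGetImageDesc_E,
    DGifGetImageHeader_5 := h_DGifGetImageHeader_5,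
    DGifGetImageHeader_E := h_DGifGetImageHeader_E,
    DGifGetImageHeader_P := h_DGifGetImageHeader_P,
    DGifGetLine_1 := h_DGifGetLine_1,
    DGifGetLine_E := h_DGifGetLine_E,
    DGifGetLine_P := h_DGifGetLine_P,
    DGifGetPrefixChar := h_DGifGetPrefixChar,
    DGifGetRecordType_2 := h_DGifGetRecordType_2,
    DGifGetRecordType_E := h_DGifGetRecordType_E,
    DGifGetRecordType_P := h_DGifGetRecordType_P,
    DGifGetScreenDesc_3 := h_DGifGetScreenDesc_3,
    DGifGetScreenDesc_6 := h_DGifGetScreenDesc_6,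
    DGifGetScreenDesc_E := h_DGifGetScreenDesc_E,
    DGifGetScreenDesc_P := h_DGifGetScreenDesc_P,
    DGifGetWord_E := h_DGifGetWord_E,
    DGifGetWord_P := h_DGifGetWord_P,
    DGifOpen_1 := h_DGifOpen_1,
    DGifOpen_2 := h_DGifOpen_2,
    DGifOpen_E := h_DGifOpen_E,
    DGifOpen_P := h_DGifOpen_P,
    DGifSetupDecompress_2 := h_DGifSetupDecompress_2,
    DGifSetupDecompress_3 := h_DGifSetupDecompress_3,
    DGifSetupDecompress_E := h_DGifSetupDecompress_E,
    DGifSetupDecompress_P := h_DGifSetupDecompress_P,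
    DGifSlurp_1 := h_DGifSlurp_1,
    DGifSlurp_12 := h_DGifSlurp_12,
    DGifSlurp_7 := h_DGifSlurp_7,
    DGifSlurp_9 := h_DGifSlurp_9,
    DGifSlurp_E := h_DGifSlurp_E,
    DGifSlurp_P := h_DGifSlurp_P,
    GifAddExtensionBlock_2 := h_GifAddExtensionBlock_2,
    GifAddExtensionBlock_3 := h_GifAddExtensionBlock_3,
    GifAddExtensionBlock_E := h_GifAddExtensionBlock_E,
    GifBitSize := h_GifBitSize,
    GifFreeExtensions_1 := h_GifFreeExtensions_1,
    GifFreeExtensions_2 := h_GifFreeExtensions_2,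
    GifFreeExtensions_COMPOSITION := h_GifFreeExtensions_COMPOSITION,
    GifFreeMapObject := h_GifFreeMapObject,
    GifFreeSavedImages_1 := h_GifFreeSavedImages_1,
    GifFreeSavedImages_2 := h_GifFreeSavedImages_2,
    GifFreeSavedImages_3 := h_GifFreeSavedImages_3,
    GifFreeSavedImages_COMPOSITION := h_GifFreeSavedImages_COMPOSITION,
    GifMakeMapObject_1 := h_GifMakeMapObject_1,
    GifMakeMapObject_2 := h_GifMakeMapObject_2,
    GifMakeMapObject_E := h_GifMakeMapObject_E,
    digest_byte := h_digest_byte,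
    digest_bytes := h_digest_bytes,
    digest_extensions_E := h_digest_extensions_E,
    digest_int := h_digest_int,
    digest_map_1 := h_digest_map_1,
    digest_map_2 := h_digest_map_2,
    digest_map_E := h_digest_map_E,
    gif_decode_1 := h_gif_decode_1,
    gif_decode_E := h_gif_decode_E,
    gif_decode_P := h_gif_decode_P,
    mem_read := h_mem_read,
    openbsd_reallocarray := h_openbsd_reallocarray,
    prog_main_E := h_prog_main_E,
    prog_main_P := h_prog_main_P,
    strncmp := h_strncmp,
    sub_I_65535_1 := h_sub_I_65535_1,
    DGifCloseFile_1 := h_DGifCloseFile_1,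
    DGifCloseFile_2 := h_DGifCloseFile_2,
    DGifCloseFile_3 := h_DGifCloseFile_3,
    DGifCloseFile_4 := h_DGifCloseFile_4,
    DGifCloseFile_COMPOSITION := h_DGifCloseFile_COMPOSITION,
    DGifDecompressLine_14 := h_DGifDecompressLine_14,
    DGifDecompressLine_15 := h_DGifDecompressLine_15,
    DGifDecompressLine_8 := h_DGifDecompressLine_8,
    DGifDecompressLine_9 := h_DGifDecompressLine_9,
    DGifDecreaseImageCounter_2 := h_DGifDecreaseImageCounter_2,
    DGifDecreaseImageCounter_3 := h_DGifDecreaseImageCounter_3,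
    DGifDecreaseImageCounter_COMPOSITION := h_DGifDecreaseImageCounter_COMPOSITION,
    DGifGetImageDesc_2 := h_DGifGetImageDesc_2,
    DGifOpen_4 := h_DGifOpen_4,
    DGifSlurp_4 := h_DGifSlurp_4,
    DGifSlurp_5 := h_DGifSlurp_5,
    GifAddExtensionBlock_1 := h_GifAddExtensionBlock_1,
    GifAddExtensionBlock_COMPOSITION := h_GifAddExtensionBlock_COMPOSITION,
    GifMakeMapObject_COMPOSITION := h_GifMakeMapObject_COMPOSITION,
    InternalRead := h_InternalRead,
    digest_extensions_1 := h_digest_extensions_1,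
    digest_extensions_2 := h_digest_extensions_2,
    digest_extensions_COMPOSITION := h_digest_extensions_COMPOSITION,
    digest_file_1 := h_digest_file_1,
    digest_file_2 := h_digest_file_2,
    digest_file_4 := h_digest_file_4,
    digest_file_5 := h_digest_file_5,
    digest_file_7 := h_digest_file_7,
    digest_map_COMPOSITION := h_digest_map_COMPOSITION,
    gif_decode_5 := h_gif_decode_5,
    run_ctors := h_run_ctors,
    DGifBufferedInput_2 := h_DGifBufferedInput_2,
    DGifBufferedInput_3 := h_DGifBufferedInput_3,
    DGifBufferedInput_COMPOSITION := h_DGifBufferedInput_COMPOSITION,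
    DGifDecompressInput_2 := h_DGifDecompressInput_2,
    DGifDecompressInput_COMPOSITION := h_DGifDecompressInput_COMPOSITION,
    DGifDecompressLine_3 := h_DGifDecompressLine_3,
    DGifDecompressLine_COMPOSITION := h_DGifDecompressLine_COMPOSITION,
    DGifGetCodeNext_1 := h_DGifGetCodeNext_1,
    DGifGetCodeNext_2 := h_DGifGetCodeNext_2,
    DGifGetCodeNext_COMPOSITION := h_DGifGetCodeNext_COMPOSITION,
    DGifGetExtensionNext_1 := h_DGifGetExtensionNext_1,
    DGifGetExtensionNext_2 := h_DGifGetExtensionNext_2,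
    DGifGetExtensionNext_COMPOSITION := h_DGifGetExtensionNext_COMPOSITION,
    DGifGetExtension_1 := h_DGifGetExtension_1,
    DGifGetExtension_2 := h_DGifGetExtension_2,
    DGifGetExtension_COMPOSITION := h_DGifGetExtension_COMPOSITION,
    DGifGetImageDesc_5 := h_DGifGetImageDesc_5,
    DGifGetImageHeader_3 := h_DGifGetImageHeader_3,
    DGifGetImageHeader_4 := h_DGifGetImageHeader_4,
    DGifGetLine_2 := h_DGifGetLine_2,
    DGifGetLine_3 := h_DGifGetLine_3,
    DGifGetLine_COMPOSITION := h_DGifGetLine_COMPOSITION,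
    DGifGetRecordType_1 := h_DGifGetRecordType_1,
    DGifGetRecordType_COMPOSITION := h_DGifGetRecordType_COMPOSITION,
    DGifGetScreenDesc_2 := h_DGifGetScreenDesc_2,
    DGifGetScreenDesc_4 := h_DGifGetScreenDesc_4,
    DGifGetScreenDesc_5 := h_DGifGetScreenDesc_5,
    DGifGetWord_1 := h_DGifGetWord_1,
    DGifGetWord_COMPOSITION := h_DGifGetWord_COMPOSITION,
    DGifOpen_3 := h_DGifOpen_3,
    DGifSetupDecompress_1 := h_DGifSetupDecompress_1,
    DGifSetupDecompress_COMPOSITION := h_DGifSetupDecompress_COMPOSITION,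
    DGifSlurp_10 := h_DGifSlurp_10,
    DGifSlurp_11 := h_DGifSlurp_11,
    DGifSlurp_2 := h_DGifSlurp_2,
    DGifSlurp_6 := h_DGifSlurp_6,
    DGifSlurp_8 := h_DGifSlurp_8,
    digest_file_3 := h_digest_file_3,
    digest_file_6 := h_digest_file_6,
    digest_file_COMPOSITION := h_digest_file_COMPOSITION,
    gif_decode_4 := h_gif_decode_4,
    DGifGetImageHeader_1 := h_DGifGetImageHeader_1,
    DGifGetImageHeader_2 := h_DGifGetImageHeader_2,
    DGifGetImageHeader_6 := h_DGifGetImageHeader_6,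
    DGifGetImageHeader_COMPOSITION := h_DGifGetImageHeader_COMPOSITION,
    DGifGetScreenDesc_1 := h_DGifGetScreenDesc_1,
    DGifGetScreenDesc_COMPOSITION := h_DGifGetScreenDesc_COMPOSITION,
    DGifOpen_5 := h_DGifOpen_5,
    DGifOpen_COMPOSITION := h_DGifOpen_COMPOSITION,
    gif_decode_2 := h_gif_decode_2,
    DGifGetImageDesc_1 := h_DGifGetImageDesc_1,
    DGifGetImageDesc_COMPOSITION := h_DGifGetImageDesc_COMPOSITION,
    DGifSlurp_3 := h_DGifSlurp_3,
    DGifSlurp_COMPOSITION := h_DGifSlurp_COMPOSITION,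
    gif_decode_3 := h_gif_decode_3,
    gif_decode_COMPOSITION := h_gif_decode_COMPOSITION,
    prog_main_1 := h_prog_main_1,
    prog_main_COMPOSITION := h_prog_main_COMPOSITION
  }

end Gif.Closed
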